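-- pv_equiv track=rewrite | github.com/TH18-code/Simulations-labb2 | polymer.py | random_walk_2d_own
-- ===== SOURCE A (Python) =====
-- def random_walk_2d_own(steps):
--     x, y = 0, 0
--     x_coords, y_coords = [x], [y]
--     # previous r in the sequence
--     r_prev = 1
--     m = 129
--
--     for _ in range(steps):
--         r = custom_random_generator(r_prev, 3, 4, m)
--         r_prev = r
--         direction = r//(m//4)
--         if direction == 0:
--             x += 1  # Move right
--         elif direction == 1:
--             x -= 1  # Move left
--         elif direction == 2:
--             y += 1  # Move up
--         else:
--             y -= 1  # Move down
--
--         x_coords.append(x)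
--         y_coords.append(y)
--
--     return x_coords, y_coords
--
-- def custom_random_generator(r_prev, a=3, c=4, m=128):
--     """
--     Custom random number generator.
--
--     Args:
--     r_prev (int): The previous random number.
--     a (int): The multiplier parameter.
--     c (int): The increment parameter.
--     m (int): The modulus parameter.
--
--     Returns:
--     int: The next random number in the sequence.
--     """
--
--     return (a * r_prev + c) % m
-- ===== SOURCE B (Python) =====
-- def custom_random_generator(r_prev, a=3, c=4, m=128):
--     return (a * r_prev + c) % m
--
--
-- def random_walk_2d_own(steps):
--     m = 129
--     q = m // 4
--     # Pass 1: run the LCG forward and record the per-step (dx, dy) deltas.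
--     deltas = []
--     r = 1
--     for _ in range(steps):
--         r = custom_random_generator(r, 3, 4, m)
--         d = r // q
--         if d == 0:
--             deltas.append((1, 0))
--         elif d == 1:
--             deltas.append((-1, 0))
--         elif d == 2:
--             deltas.append((0, 1))
--         else:
--             deltas.append((0, -1))
--     # Pass 2: cumulative sums of the deltas, starting at the origin.
--     x, y = 0, 0
--     x_coords, y_coords = [x], [y]
--     for dx, dy in deltas:
--         x += dx
--         y += dy
--         x_coords.append(x)
--         y_coords.append(y)
--     return x_coords, y_coords
-- ===== Notes on version B (the rewrite author's own statement) =====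
-- stated objective: alternative
-- what changed: B splits A's fused update-and-append loop into two passes: one pass runs the LCG and materialises a list of per-step (dx,dy) deltas, a second pass accumulates the deltas into the coordinate lists.
import Mathlib
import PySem

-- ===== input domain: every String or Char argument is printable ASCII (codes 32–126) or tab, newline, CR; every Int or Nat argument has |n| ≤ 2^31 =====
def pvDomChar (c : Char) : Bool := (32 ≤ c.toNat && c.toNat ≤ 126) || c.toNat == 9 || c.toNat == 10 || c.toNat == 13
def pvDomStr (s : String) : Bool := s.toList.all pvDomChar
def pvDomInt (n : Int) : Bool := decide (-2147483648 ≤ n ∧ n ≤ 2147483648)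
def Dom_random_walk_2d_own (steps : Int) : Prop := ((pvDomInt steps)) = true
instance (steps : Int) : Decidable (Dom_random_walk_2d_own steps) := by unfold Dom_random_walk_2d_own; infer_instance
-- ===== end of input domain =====

-- B restructures A's fused update-and-append loop as two passes (LCG deltas, then cumulative sums); same cost, alternative decomposition.

-- ===== PORT A =====
-- custom_random_generator(r_prev, 3, 4, 129)
def pvRng (r_prev : Int) : Int := PySem.Int.mod (3 * r_prev + 4) 129

-- one iteration of A's loop body over state (x, y, r_prev, x_coords, y_coords)
def pvStepA (s : Int × Int × Int × List Int × List Int) (_ : Int) :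
    Int × Int × Int × List Int × List Int :=
  let r := pvRng s.2.2.1
  let direction := PySem.Int.floordiv r (PySem.Int.floordiv 129 4)
  let xy : Int × Int :=
    if direction = 0 then (s.1 + 1, s.2.1)
    else if direction = 1 then (s.1 - 1, s.2.1)
    else if direction = 2 then (s.1, s.2.1 + 1)
    else (s.1, s.2.1 - 1)
  (xy.1, xy.2, r, s.2.2.2.1 ++ [xy.1], s.2.2.2.2 ++ [xy.2])

def random_walk_2d_own (steps : Int) : List Int × List Int :=
  let st := (PySem.List.pyRange 0 steps 1).foldl pvStepA (0, 0, 1, [0], [0])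
  (st.2.2.2.1, st.2.2.2.2)

-- ===== PORT B =====
-- pass 1 body: state (r, deltas); append this step's (dx, dy)
def pvStepD (s : Int × List (Int × Int)) (_ : Int) : Int × List (Int × Int) :=
  let r := pvRng s.1
  let d := PySem.Int.floordiv r (PySem.Int.floordiv 129 4)
  let δ : Int × Int :=
    if d = 0 then (1, 0)
    else if d = 1 then (-1, 0)
    else if d = 2 then (0, 1)
    else (0, -1)
  (r, s.2 ++ [δ])

-- pass 2 body: state (x, y, x_coords, y_coords); add a delta and append
def pvStepB (s : Int × Int × List Int × List Int) (d : Int × Int) :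
    Int × Int × List Int × List Int :=
  let x := s.1 + d.1
  let y := s.2.1 + d.2
  (x, y, s.2.2.1 ++ [x], s.2.2.2 ++ [y])

def random_walk_2d_own_alt (steps : Int) : List Int × List Int :=
  let deltas := ((PySem.List.pyRange 0 steps 1).foldl pvStepD (1, [])).2
  let st := deltas.foldl pvStepB (0, 0, [0], [0])
  (st.2.2.1, st.2.2.2)

-- ===== PRECONDITION & SPEC =====
def Spec_random_walk_2d_own (steps : Int) (out : List Int × List Int) : Prop := out = random_walk_2d_own_alt steps
instance (steps : Int) (out : List Int × List Int) : Decidable (Spec_random_walk_2d_own steps out) := by unfold Spec_random_walk_2d_own; infer_instance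

-- ===== CLAIM (what is proved, stated in full; the proofs are below) =====
def Claim_equal_random_walk_2d_own : Prop := ∀ (steps : Int), Dom_random_walk_2d_own steps → Spec_random_walk_2d_own steps (random_walk_2d_own steps)

-- ===== LEMMAS AND PROOFS =====

-- pass-1 fold appends on the right: the accumulator factors out
theorem pvStepD_shift (l : List Int) (r : Int) (acc : List (Int × Int)) :
    List.foldl pvStepD (r, acc) l
      = ((List.foldl pvStepD (r, []) l).1, acc ++ (List.foldl pvStepD (r, []) l).2) := by
  induction l generalizing r acc with
  | nil => simp
  | cons a l ih =>
      simp only [List.foldl_cons]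
      rw [ih, ih (pvStepD (r, []) a).1]
      simp [pvStepD]

-- invariant: A's fused fold agrees with delta-generation followed by accumulation
theorem pv_main (l : List Int) (x y rp : Int) (xs ys : List Int) :
    (fun s => (s.2.2.2.1, s.2.2.2.2)) (List.foldl pvStepA (x, y, rp, xs, ys) l)
      = (fun s => (s.2.2.1, s.2.2.2))
          (List.foldl pvStepB (x, y, xs, ys) ((List.foldl pvStepD (rp, []) l).2)) := by
  induction l generalizing x y rp xs ys with
  | nil => simp
  | cons a l ih =>
      simp only [List.foldl_cons]
      rw [show pvStepD (rp, []) a = (pvRng rp, [(pvStepD (rp, []) a).2.headI]) from by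
            simp [pvStepD]]
      rw [pvStepD_shift]
      simp only [List.foldl_append, List.foldl_cons, List.foldl_nil]
      have hAB : pvStepA (x, y, rp, xs, ys) a =
          ((pvStepB (x, y, xs, ys) (pvStepD (rp, []) a).2.headI).1,
           (pvStepB (x, y, xs, ys) (pvStepD (rp, []) a).2.headI).2.1, pvRng rp,
           (pvStepB (x, y, xs, ys) (pvStepD (rp, []) a).2.headI).2.2.1,
           (pvStepB (x, y, xs, ys) (pvStepD (rp, []) a).2.headI).2.2.2) := by
        simp only [pvStepA, pvStepB, pvStepD]
        split_ifs <;> simp [sub_eq_add_neg]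
      rw [hAB]
      exact ih _ _ _ _ _

-- ===== VERDICT (by name: the statement is the Claim_ definition above) =====
theorem random_walk_2d_own_spec : Claim_equal_random_walk_2d_own := by
  intro steps _
  unfold Spec_random_walk_2d_own random_walk_2d_own random_walk_2d_own_alt
  simpa using pv_main (PySem.List.pyRange 0 steps 1) 0 0 1 [0] [0]
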